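-- pv_equiv track=rewrite | github.com/ScriptXDemon/blockvault-hari | apps/api/src/blockvault_api/zkpt_poseidon.py | _generate_mds_matrix
-- ===== SOURCE A (Python) =====
-- BN254_PRIME = 21888242871839275222246405745257275088548364400416034343698204186575808495617
--
-- def _generate_mds_matrix(t: int) -> list[list[int]]:
--     x_values = list(range(t))
--     y_values = list(range(t, 2 * t))
--     matrix: list[list[int]] = []
--     for row_index in range(t):
--         row: list[int] = []
--         for column_index in range(t):
--             value = (x_values[row_index] + y_values[column_index]) % BN254_PRIME
--             row.append(pow(value, BN254_PRIME - 2, BN254_PRIME))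
--         matrix.append(row)
--     return matrix
-- ===== SOURCE B (Python) =====
-- BN254_PRIME = 21888242871839275222246405745257275088548364400416034343698204186575808495617
--
-- def _generate_mds_matrix(t: int) -> list[list[int]]:
--     # Each entry depends only on i+j: precompute the 2t-1 diagonal inverses once,
--     # then each row i is the slice inv[i:i+t].
--     inv = [pow((t + k) % BN254_PRIME, BN254_PRIME - 2, BN254_PRIME)
--            for k in range(max(2 * t - 1, 0))]
--     return [inv[i:i + t] for i in range(t)]
-- ===== Notes on version B (the rewrite author's own statement) =====
-- stated objective: faster
-- what changed: Entries depend only on i+j, so B precomputes the 2t-1 diagonal inverses once and builds each row as a slice of that list, instead of doing a modular exponentiation per matrix cell.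
import Mathlib
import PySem

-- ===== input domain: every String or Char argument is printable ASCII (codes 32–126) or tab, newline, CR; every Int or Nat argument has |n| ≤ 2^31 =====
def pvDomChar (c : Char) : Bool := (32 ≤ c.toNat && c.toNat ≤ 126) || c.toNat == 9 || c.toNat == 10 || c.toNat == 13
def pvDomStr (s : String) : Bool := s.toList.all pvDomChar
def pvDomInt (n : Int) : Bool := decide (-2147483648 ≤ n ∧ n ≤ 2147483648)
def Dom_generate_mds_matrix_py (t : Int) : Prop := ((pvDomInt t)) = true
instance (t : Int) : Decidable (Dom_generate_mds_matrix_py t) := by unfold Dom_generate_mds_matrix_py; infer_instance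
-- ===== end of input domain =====

-- B precomputes the 2t-1 diagonal inverses once (entries depend only on i+j) and takes
-- each row as a slice, replacing t^2 modular exponentiations by 2t-1.

def BN254_PRIME : Int := 21888242871839275222246405745257275088548364400416034343698204186575808495617

def BN254_EXP : Nat := 21888242871839275222246405745257275088548364400416034343698204186575808495615

-- hand port of Python's three-argument pow(b, e, m) (m > 0, e ≥ 0): square-and-multiply,
-- reducing mod m at every step; exact here because pow(b,0,m) = 1 % m and
-- pow(b,e,m) = ((pow(b,e//2,m)^2 % m) * b^(e%2)) % m for a positive modulus.
-- (pvPowMod denotes the same value but cannot be evaluated at a 254-bit exponent.)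
def pvPowMod (b : Int) (e : Nat) (m : Int) : Int :=
  if e = 0 then PySem.Int.mod 1 m
  else
    let h := pvPowMod b (e / 2) m
    let h2 := PySem.Int.mod (h * h) m
    if e % 2 = 0 then h2 else PySem.Int.mod (h2 * b) m

-- ===== PORT A =====
def generate_mds_matrix_py (t : Int) : List (List Int) :=
  let x_values := PySem.List.pyRange 0 t 1
  let y_values := PySem.List.pyRange t (2 * t) 1
  (PySem.List.pyRange 0 t 1).foldl (fun matrix row_index =>
    matrix ++ [(PySem.List.pyRange 0 t 1).foldl (fun row column_index =>
      let value := PySem.Int.mod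
        (PySem.List.pyGetD x_values row_index 0 + PySem.List.pyGetD y_values column_index 0)
        BN254_PRIME
      row ++ [pvPowMod value BN254_EXP BN254_PRIME]) []]) []

-- ===== PORT B =====
def generate_mds_matrix_py_alt (t : Int) : List (List Int) :=
  let inv := (PySem.List.pyRange 0 (max (2 * t - 1) 0) 1).map (fun k =>
    pvPowMod (PySem.Int.mod (t + k) BN254_PRIME) BN254_EXP BN254_PRIME)
  (PySem.List.pyRange 0 t 1).map (fun i => PySem.List.slice inv (some i) (some (i + t)))

-- ===== PRECONDITION & SPEC =====
def Spec_generate_mds_matrix_py (t : Int) (out : List (List Int)) : Prop := out = generate_mds_matrix_py_alt t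
instance (t : Int) (out : List (List Int)) : Decidable (Spec_generate_mds_matrix_py t out) := by unfold Spec_generate_mds_matrix_py; infer_instance

-- ===== CLAIM (what is proved, stated in full; the proofs are below) =====
def Claim_equal_generate_mds_matrix_py : Prop := ∀ (t : Int), Dom_generate_mds_matrix_py t → Spec_generate_mds_matrix_py t (generate_mds_matrix_py t)

-- ===== LEMMAS AND PROOFS =====

-- the common entry value, as a function of the diagonal index i + j
def pvEntry (t v : Int) : Int :=
  pvPowMod (PySem.Int.mod (t + v) BN254_PRIME) BN254_EXP BN254_PRIME

lemma pvA_row (t i : Int) (hi0 : 0 ≤ i) (hit : i < t) :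
    (PySem.List.pyRange 0 t 1).foldl (fun row column_index =>
      row ++ [pvPowMod (PySem.Int.mod
        (PySem.List.pyGetD (PySem.List.pyRange 0 t 1) i 0 +
         PySem.List.pyGetD (PySem.List.pyRange t (2 * t) 1) column_index 0)
        BN254_PRIME) BN254_EXP BN254_PRIME]) []
    = (PySem.List.pyRange 0 t 1).map (fun j => pvEntry t (i + j)) := by
  rw [PySem.List.foldl_append_singleton_eq_map
    (fun column_index => pvPowMod (PySem.Int.mod
      (PySem.List.pyGetD (PySem.List.pyRange 0 t 1) i 0 +
       PySem.List.pyGetD (PySem.List.pyRange t (2 * t) 1) column_index 0)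
      BN254_PRIME) BN254_EXP BN254_PRIME)]
  rw [List.nil_append]
  refine List.map_congr_left ?_
  intro j hj
  rw [PySem.List.mem_pyRange_one] at hj
  have hx : PySem.List.pyGetD (PySem.List.pyRange 0 t 1) i 0 = i := by
    rw [PySem.List.pyGetD_eq_getElem _ _ hi0
      (by rw [PySem.List.length_pyRange_one]; omega)]
    rw [PySem.List.getElem_pyRange_one]
    omega
  have hy : PySem.List.pyGetD (PySem.List.pyRange t (2 * t) 1) j 0 = t + j := by
    rcases hj with ⟨hj0, hjt⟩
    rw [show j = (t + j) - t by ring] at hj0 ⊢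
    rw [PySem.List.pyGetD_eq_getElem _ _ (by omega)
      (by rw [PySem.List.length_pyRange_one]; omega)]
    rw [PySem.List.getElem_pyRange_one]
    omega
  rw [hx, hy]
  unfold pvEntry
  congr 1
  ring_nf

lemma pvB_row (t i : Int) (hi0 : 0 ≤ i) (hit : i < t) :
    PySem.List.slice
      ((PySem.List.pyRange 0 (max (2 * t - 1) 0) 1).map (fun k => pvEntry t k))
      (some i) (some (i + t))
    = (PySem.List.pyRange 0 t 1).map (fun j => pvEntry t (i + j)) := by
  have ht : 0 < t := lt_of_le_of_lt hi0 hit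
  rw [PySem.List.slice_toNat _ hi0 (by omega)]
  apply List.ext_getElem
  · simp [PySem.List.length_pyRange_one]
    omega
  · intro n h1 h2
    simp only [List.getElem_take, List.getElem_drop, List.getElem_map,
      PySem.List.getElem_pyRange_one]
    congr 1
    omega

-- ===== VERDICT (by name: the statement is the Claim_ definition above) =====
theorem generate_mds_matrix_py_spec : Claim_equal_generate_mds_matrix_py := by
  intro t _
  show generate_mds_matrix_py t = generate_mds_matrix_py_alt t
  unfold generate_mds_matrix_py generate_mds_matrix_py_alt
  rw [PySem.List.foldl_append_singleton_eq_map]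
  refine List.map_congr_left ?_
  intro i hi
  rw [PySem.List.mem_pyRange_one] at hi
  rw [pvA_row t i hi.1 hi.2]
  rw [show (fun k => pvPowMod (PySem.Int.mod (t + k) BN254_PRIME) BN254_EXP BN254_PRIME) = pvEntry t from rfl]
  rw [pvB_row t i hi.1 hi.2]
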